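-- pv_equiv track=rewrite | github.com/gustavolimav/AV1-Grafos | app.py | ND_biggest_degree
-- ===== SOURCE A (Python) =====
-- def ND_biggest_degree(graph, direcionado):
--
--     degree = {}
--     degree_v = []
--
--     for i in graph.keys():
--         degree[i] = len(graph.get(i))
--
--     for key in graph.keys():
--         if degree[key] == max(degree.values()):
--             degree_v.append(key)
--
--     return degree_v, max(degree.values())
-- ===== SOURCE B (Python) =====
-- def ND_biggest_degree(graph, direcionado):
--     buckets = {}
--     for v, adj in graph.items():
--         buckets.setdefault(len(adj), []).append(v)
--     m = max(buckets)
--     return buckets[m], m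
-- ===== Notes on version B (the rewrite author's own statement) =====
-- stated objective: faster
-- what changed: Replaces the vertex->degree table plus a max-filter pass that recomputes max(degree.values()) inside the loop by a single pass building a degree->vertices bucket dict with setdefault, then one max over the bucket keys and a single lookup.
import Mathlib
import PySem

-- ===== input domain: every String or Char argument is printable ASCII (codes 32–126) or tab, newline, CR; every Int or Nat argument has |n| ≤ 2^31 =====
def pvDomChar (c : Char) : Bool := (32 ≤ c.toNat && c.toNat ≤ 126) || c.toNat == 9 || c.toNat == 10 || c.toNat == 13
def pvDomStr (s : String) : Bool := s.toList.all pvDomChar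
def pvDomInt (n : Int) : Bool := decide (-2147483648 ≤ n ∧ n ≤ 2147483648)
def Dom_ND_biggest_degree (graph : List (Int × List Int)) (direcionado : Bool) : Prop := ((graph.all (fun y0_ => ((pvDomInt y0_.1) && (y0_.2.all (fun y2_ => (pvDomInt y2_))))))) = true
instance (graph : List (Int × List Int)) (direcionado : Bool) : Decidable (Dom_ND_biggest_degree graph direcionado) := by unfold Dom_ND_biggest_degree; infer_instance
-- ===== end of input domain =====

-- B groups vertices into a degree-indexed bucket dict in one pass and takes the max over the bucket
-- keys, instead of A's vertex->degree table followed by a max-filter pass over all vertices.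

-- Python's max(xs) for a nonempty Int list; the none branch (empty sequence: Python raises ValueError) is outside Pre_.
def pyMax (xs : List Int) : Int :=
  match PySem.List.max? xs (fun x => x) with
  | some m => m
  | none => 0

-- ===== PORT A =====
def ND_biggest_degree (graph : List (Int × List Int)) (direcionado : Bool) : List Int × Int :=
  let g := PySem.Dict.mk graph
  let degree := g.keys.foldl (fun d i => PySem.Dict.insert d i (Int.ofNat ((PySem.Dict.getD g i []).length))) PySem.Dict.empty
  let degree_v := g.keys.foldl (fun acc key =>
      if PySem.Dict.getD degree key 0 = pyMax (PySem.Dict.values degree) then acc ++ [key] else acc) []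
  (degree_v, pyMax (PySem.Dict.values degree))

-- ===== PORT B =====
def ND_biggest_degree_alt (graph : List (Int × List Int)) (direcionado : Bool) : List Int × Int :=
  let buckets := graph.foldl (fun d p => PySem.Dict.modify d (Int.ofNat p.2.length) [] (fun l => l ++ [p.1])) PySem.Dict.empty
  let m := pyMax (PySem.Dict.keys buckets)
  (PySem.Dict.getD buckets m [], m)

-- ===== PRECONDITION & SPEC =====
-- Pre_ excludes the empty graph, on which both Pythons raise ValueError (max of an empty sequence),
-- and assoc lists with duplicate keys, which do not represent any Python dict input (dict keys are unique).
def Pre_ND_biggest_degree (graph : List (Int × List Int)) (direcionado : Bool) : Prop :=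
  graph ≠ [] ∧ (graph.map Prod.fst).Nodup
instance (graph : List (Int × List Int)) (direcionado : Bool) : Decidable (Pre_ND_biggest_degree graph direcionado) := by unfold Pre_ND_biggest_degree; infer_instance
def pvWitness_ND_biggest_degree : (List (Int × List Int)) × Bool := ([(0, [1]), (1, [])], true)

def Spec_ND_biggest_degree (graph : List (Int × List Int)) (direcionado : Bool) (out : List Int × Int) : Prop := out = ND_biggest_degree_alt graph direcionado
instance (graph : List (Int × List Int)) (direcionado : Bool) (out : List Int × Int) : Decidable (Spec_ND_biggest_degree graph direcionado out) := by unfold Spec_ND_biggest_degree; infer_instance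

-- ===== CLAIM (what is proved, stated in full; the proofs are below) =====
def Claim_equal_ND_biggest_degree : Prop := ∀ (graph : List (Int × List Int)) (direcionado : Bool), Dom_ND_biggest_degree graph direcionado → Pre_ND_biggest_degree graph direcionado → Spec_ND_biggest_degree graph direcionado (ND_biggest_degree graph direcionado)

-- ===== LEMMAS AND PROOFS =====

theorem pyMax_congr (xs ys : List Int) (hx : xs ≠ []) (h : ∀ a, a ∈ xs ↔ a ∈ ys) : pyMax xs = pyMax ys := by
  have hy : ys ≠ [] := by
    obtain ⟨a, ha⟩ := List.exists_mem_of_ne_nil xs hx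
    exact List.ne_nil_of_mem ((h a).1 ha)
  obtain ⟨m, hm⟩ := Option.ne_none_iff_exists'.1 (fun hc => hx ((PySem.List.max?_eq_none_iff xs (fun x => x)).1 hc))
  obtain ⟨m', hm'⟩ := Option.ne_none_iff_exists'.1 (fun hc => hy ((PySem.List.max?_eq_none_iff ys (fun x => x)).1 hc))
  have h1 : m ≤ m' := PySem.List.max?_isMax hm' m ((h m).1 (PySem.List.max?_mem hm))
  have h2 : m' ≤ m := PySem.List.max?_isMax hm m' ((h m').2 (PySem.List.max?_mem hm'))
  simp [pyMax, hm, hm']; omega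

theorem getD_buckets (l : List (Int × List Int)) (d : PySem.Dict Int (List Int)) (v : Int) :
    PySem.Dict.getD (l.foldl (fun d p => PySem.Dict.modify d (Int.ofNat p.2.length) [] (fun l => l ++ [p.1])) d) v []
      = PySem.Dict.getD d v [] ++ (l.filter (fun p => Int.ofNat p.2.length == v)).map Prod.fst := by
  induction l generalizing d with
  | nil => simp
  | cons p t ih =>
    simp only [List.foldl_cons, List.filter_cons, ih]
    by_cases hv : Int.ofNat p.2.length = v
    · subst hv; simp [PySem.Dict.getD_modify]
    · have hv2 : ¬ ((p.2.length : Int) = v) := by exact_mod_cast hv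
      have hv3 : ¬ (v = (p.2.length : Int)) := fun h => hv2 h.symm
      simp [PySem.Dict.getD_modify, hv2, hv3]

theorem ND_ports_agree (graph : List (Int × List Int)) (direcionado : Bool)
    (hne : graph ≠ []) (hnd : (graph.map Prod.fst).Nodup) :
    ND_biggest_degree graph direcionado = ND_biggest_degree_alt graph direcionado := by
  simp only [ND_biggest_degree, ND_biggest_degree_alt]
  set g := PySem.Dict.mk graph with hg
  have hkeys : PySem.Dict.keys g = graph.map Prod.fst := by simp [hg, PySem.Dict.keys]
  have hgnd : (PySem.Dict.keys g).Nodup := by rw [hkeys]; exact hnd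
  -- lookup in g
  have hget : ∀ p ∈ graph, PySem.Dict.getD g p.1 [] = p.2 := by
    intro p hp
    exact PySem.Dict.getD_of_mem_items (d := g) (by simpa [hg, PySem.Dict.items] using hp) hgnd []
  set f : Int → Int := fun i => Int.ofNat ((PySem.Dict.getD g i []).length) with hf
  set degree := (PySem.Dict.keys g).foldl (fun d i => PySem.Dict.insert d i (f i)) PySem.Dict.empty with hdegree
  have hitems : PySem.Dict.items degree = (PySem.Dict.keys g).map (fun i => (i, f i)) := by
    rw [hdegree, PySem.Dict.items_foldl_insert_fresh (PySem.Dict.keys g) (fun i => i) f PySem.Dict.empty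
      (fun a _ => PySem.Dict.contains_empty a) (by simpa using hgnd)]
    simp [PySem.Dict.items, PySem.Dict.empty]
  have hdnd : (PySem.Dict.keys degree).Nodup := by
    have : PySem.Dict.keys degree = PySem.Dict.keys g := by
      simp [PySem.Dict.keys, hitems]
    rw [this]; exact hgnd
  set L : List Int := graph.map (fun p => Int.ofNat p.2.length) with hL
  have hLne : L ≠ [] := by simp [hL, hne]
  have hvals : PySem.Dict.values degree = L := by
    simp only [PySem.Dict.values, hitems, hkeys, List.map_map, hL]
    refine List.map_congr_left ?_
    intro p hp
    simp [hf, hget p hp]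
  have hdgetD : ∀ p ∈ graph, PySem.Dict.getD degree p.1 0 = Int.ofNat p.2.length := by
    intro p hp
    have hmem : (p.1, f p.1) ∈ PySem.Dict.items degree := by
      rw [hitems, hkeys]
      exact List.mem_map_of_mem (List.mem_map_of_mem hp)
    have h2 := PySem.Dict.getD_of_mem_items (d := degree) hmem hdnd 0
    rw [h2, hf]
    simp [hget p hp]
  set M := pyMax L with hM
  have hA1 : (PySem.Dict.keys g).foldl (fun acc key =>
      if PySem.Dict.getD degree key 0 = pyMax (PySem.Dict.values degree) then acc ++ [key] else acc) []
      = (graph.filter (fun p => Int.ofNat p.2.length == M)).map Prod.fst := by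
    rw [hvals, PySem.List.foldl_append_ite_eq_filter, hkeys, List.filter_map]
    simp only [List.nil_append]
    congr 1
    refine List.filter_congr ?_
    intro p hp
    simp only [Function.comp, hdgetD p hp, ← hM]
    by_cases h : (p.2.length : Int) = M <;> simp [h]
  have hB1 : ∀ v, PySem.Dict.getD (graph.foldl (fun d p => PySem.Dict.modify d (Int.ofNat p.2.length) [] (fun l => l ++ [p.1])) PySem.Dict.empty) v []
      = (graph.filter (fun p => Int.ofNat p.2.length == v)).map Prod.fst := by
    intro v
    rw [getD_buckets]
    simp [PySem.Dict.getD, PySem.Dict.get?, PySem.Dict.empty]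
  have hBkeys : PySem.Dict.keys (graph.foldl (fun d p => PySem.Dict.modify d (Int.ofNat p.2.length) [] (fun l => l ++ [p.1])) PySem.Dict.empty)
      = PySem.Set.ofList L := by
    rw [PySem.Dict.keys_foldl_modify_key]
    simp [PySem.Set.update, PySem.Set.ofList_eq_foldl, PySem.Dict.keys, PySem.Dict.empty, hL]
  have hm : pyMax (PySem.Set.ofList L) = M := by
    refine (pyMax_congr L (PySem.Set.ofList L) hLne ?_).symm
    intro a; rw [PySem.Set.mem_ofList]
  rw [hA1, hvals, hBkeys, hm, hB1]


-- ===== VERDICT (by name: the statement is the Claim_ definition above) =====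
theorem ND_biggest_degree_spec : Claim_equal_ND_biggest_degree := by
  intro graph direcionado _ hpre
  exact ND_ports_agree graph direcionado hpre.1 hpre.2
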